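-- pv_equiv track=rewrite | github.com/IlyeumInsights/ana | ana/preparation/DataSelection.py | mergeGranule
-- ===== SOURCE A (Python) =====
-- def mergeGranule(data):
--     """mergeGranule
--
--     Merges granules to the upper level.
--     For now, only for higher level (clause).
--     Example: sentences to clause
--
--     :param data: Textual subgranules.
--     :type data: dict(str, str)
--
--     :return: Text for upper level granule.
--     :rtype: dict(str, str)
--
--     """
--     # intermediate List of subgranule per granule
--     intList = {}
--     # FInal text
--     granuleTexts = {}
--
--     # list all subgranule, then order them before generation of text
--     for subgranule in data:
--         granuleid = subgranule.split("_")[0] # Only first/higher for now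
--         if granuleid not in intList:
--             intList[granuleid] = []
--         intList[granuleid].append(subgranule)
--
--     for granId in intList:
--         intList[granId].sort()
--         # Generate
--         granText = ""
--         for subtextId in intList[granId]:
--             granText += data[subtextId]+" "
--         granuleTexts[granId] = granText
--
--     return granuleTexts
-- ===== SOURCE B (Python) =====
-- def mergeGranule(data):
--     """Merge subgranule texts to the upper (clause) level.
--
--     Different decomposition: one global sort of all keys up front; then a
--     single loop over the keys that, at the first occurrence of each granule
--     id, builds its whole text at once by joining the matching subtexts from
--     the globally sorted key list (no per-group lists, no per-group sorts).
--     """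
--     order = sorted(data)
--     result = {}
--     for key in data:
--         gid = key.split("_")[0]
--         if gid not in result:
--             result[gid] = "".join(data[k] + " " for k in order
--                                   if k.split("_")[0] == gid)
--     return result
-- ===== Notes on version B (the rewrite author's own statement) =====
-- stated objective: alternative
-- what changed: A groups keys into per-granule lists and then sorts and concatenates each group; B sorts all keys once globally and, in a single loop over the keys, builds each granule's whole text at the first occurrence of its id by joining the matching subtexts from the sorted list.
import Mathlib
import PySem

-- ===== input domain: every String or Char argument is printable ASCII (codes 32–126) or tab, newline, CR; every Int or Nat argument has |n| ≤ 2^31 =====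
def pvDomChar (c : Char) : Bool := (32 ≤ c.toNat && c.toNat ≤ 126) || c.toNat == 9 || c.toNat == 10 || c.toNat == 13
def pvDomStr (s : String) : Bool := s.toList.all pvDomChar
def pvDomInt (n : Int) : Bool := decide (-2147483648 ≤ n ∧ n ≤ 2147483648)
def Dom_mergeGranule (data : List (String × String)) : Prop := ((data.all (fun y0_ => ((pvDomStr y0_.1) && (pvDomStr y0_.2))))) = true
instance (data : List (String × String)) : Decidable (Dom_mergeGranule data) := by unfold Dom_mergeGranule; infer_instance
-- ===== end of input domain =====

-- B replaces A's group-into-lists-then-sort-each-group two-phase algorithm by one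
-- global key sort and a single loop that, at the first occurrence of each granule
-- id, joins all of its subtexts at once (objective: alternative; same return value).

-- ===== PORT A =====
-- subgranule.split("_")[0]: split with the nonempty separator "_" always returns
-- some nonempty list, so the ".getD []" and ".headD" defaults are never reached.
def gidOfA (k : String) : String := ((PySem.Str.split? k "_").getD []).headD ""

def mergeGranule (data : List (String × String)) : List (String × String) :=
  -- first loop: build intList, the list of subgranule keys per granule id
  let intList : PySem.Dict String (List String) :=
    (data.map Prod.fst).foldl (fun d k =>
      let g := gidOfA k
      let d' := if d.contains g then d else d.insert g []
      d'.insert g (d'.getD g [] ++ [k])) PySem.Dict.empty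
  -- second loop: sort each group's key list, concatenate the texts
  -- (data[subtextId] never raises: every key comes from data, so getD's "" is unreached)
  let granuleTexts : PySem.Dict String String :=
    intList.items.foldl (fun out p =>
      let sortedSubs := PySem.List.sorted p.2 (fun x => x) false
      let granText := sortedSubs.foldl
        (fun s k => s ++ ((PySem.Dict.mk data).getD k "" ++ " ")) ""
      out.insert p.1 granText) PySem.Dict.empty
  granuleTexts.items

-- ===== PORT B =====
def gidOfB (k : String) : String := ((PySem.Str.split? k "_").getD []).headD ""

def mergeGranule_alt (data : List (String × String)) : List (String × String) :=
  -- order = sorted(data)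
  let order := PySem.List.sorted (data.map Prod.fst) (fun x => x) false
  -- for key in data: on the first occurrence of gid, join its subtexts at once
  let result : PySem.Dict String String :=
    (data.map Prod.fst).foldl (fun d key =>
      let g := gidOfB key
      if d.contains g then d
      else d.insert g (PySem.Str.join ""
        ((order.filter (fun k => gidOfB k == g)).map
          (fun k => (PySem.Dict.mk data).getD k "" ++ " "))))
      PySem.Dict.empty
  result.items

-- ===== PRECONDITION & SPEC =====
def Spec_mergeGranule (data : List (String × String)) (out : List (String × String)) : Prop := out = mergeGranule_alt data
instance (data : List (String × String)) (out : List (String × String)) : Decidable (Spec_mergeGranule data out) := by unfold Spec_mergeGranule; infer_instance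

-- ===== CLAIM (what is proved, stated in full; the proofs are below) =====
def Claim_equal_mergeGranule : Prop := ∀ (data : List (String × String)), Dom_mergeGranule data → Spec_mergeGranule data (mergeGranule data)

-- ===== LEMMAS AND PROOFS =====

-- data[k], as both ports perform it
def pvLookup (data : List (String × String)) (k : String) : String :=
  (PySem.Dict.mk data).getD k ""

theorem gidOfB_eq : gidOfB = gidOfA := rfl

-- A's "if missing insert []; append k" step IS dict.modify with default []
theorem stepA_eq_modify (d : PySem.Dict String (List String)) (k : String) :
    (let g := gidOfA k
     let d' := if d.contains g then d else d.insert g []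
     d'.insert g (d'.getD g [] ++ [k])) = d.modify (gidOfA k) [] (· ++ [k]) := by
  show (if d.contains (gidOfA k) then d else d.insert (gidOfA k) []).insert (gidOfA k)
      ((if d.contains (gidOfA k) then d else d.insert (gidOfA k) []).getD (gidOfA k) [] ++ [k])
      = d.modify (gidOfA k) [] (· ++ [k])
  cases h : d.contains (gidOfA k) with
  | true => rw [if_pos (by simp)]; rfl
  | false =>
    rw [if_neg (by simp), PySem.Dict.getD_insert_self, PySem.Dict.insert_insert_self]
    show _ = d.insert (gidOfA k) (d.getD (gidOfA k) [] ++ [k])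
    rw [PySem.Dict.getD_of_not_contains _ _ h]

-- the filtered global sort IS the sort of the filtered keys
theorem filter_sorted_eq_sorted_filter (xs : List String) (q : String → Bool) :
    (PySem.List.sorted xs (fun x => x) false).filter q =
      PySem.List.sorted (xs.filter q) (fun x => x) false := by
  have hp : ((PySem.List.sorted xs (fun x => x) false).filter q).Perm
      (PySem.List.sorted (xs.filter q) (fun x => x) false) :=
    ((PySem.List.sorted_perm xs (fun x => x) false).filter q).trans
      (PySem.List.sorted_perm (xs.filter q) (fun x => x) false).symm
  refine hp.eq_of_pairwise (fun a b _ _ x y => le_antisymm x y) ?_ ?_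
  · have h1 : (PySem.List.sorted xs (fun x => x) false).Pairwise (· ≤ ·) := by
      simpa using PySem.List.sorted_pairwise xs (fun x => x)
    exact h1.filter q
  · simpa using PySem.List.sorted_pairwise (xs.filter q) (fun x => x)

-- A's result, characterised: one pair per distinct granule id, text = fold over its sorted keys
theorem mergeGranule_items (data : List (String × String)) :
    mergeGranule data =
      (PySem.Set.ofList ((data.map Prod.fst).map gidOfA)).map
        (fun c => (c,
          (PySem.List.sorted ((data.map Prod.fst).filter (fun k => gidOfA k == c))
              (fun x => x) false).foldl
            (fun s k => s ++ (pvLookup data k ++ " ")) "")) := by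
  unfold mergeGranule
  have hfun : (fun (d : PySem.Dict String (List String)) k =>
      let g := gidOfA k
      let d' := if d.contains g then d else d.insert g []
      d'.insert g (d'.getD g [] ++ [k])) =
      fun d k => d.modify (gidOfA k) [] (· ++ [k]) :=
    funext fun d => funext fun k => stepA_eq_modify d k
  rw [hfun]
  set keys := data.map Prod.fst with hkeys
  set grouped := keys.foldl (fun d k => d.modify (gidOfA k) [] (· ++ [k])) PySem.Dict.empty
    with hgrouped
  have hgk : grouped.keys = PySem.Set.ofList (keys.map gidOfA) := by
    rw [hgrouped,
      PySem.Dict.keys_foldl_modify_key keys gidOfA [] (fun _ k => (· ++ [k])) PySem.Dict.empty]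
    simp [PySem.Set.update_nil_left]
  have hnd : grouped.keys.Nodup := by rw [hgk]; exact PySem.Set.nodup_ofList _
  have hget : ∀ c, grouped.getD c [] = keys.filter (fun k => gidOfA k == c) := by
    intro c
    have hmap : (keys.map (fun k => (gidOfA k, k))).foldl
        (fun d p => d.modify p.1 [] (· ++ [p.2])) PySem.Dict.empty = grouped := by
      rw [List.foldl_map]
    rw [← hmap, PySem.Dict.getD_foldl_modify_append]
    simp [List.filter_map, Function.comp_def, List.map_map]
  have hitems : grouped.items =
      (PySem.Set.ofList (keys.map gidOfA)).map
        (fun c => (c, keys.filter (fun k => gidOfA k == c))) := by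
    rw [PySem.Dict.items_eq_map_keys grouped hnd [], hgk]
    exact List.map_congr_left (fun c _ => by rw [hget c])
  simp only [hitems]
  have hmain := PySem.Dict.items_foldl_insert_fresh
      ((PySem.Set.ofList (keys.map gidOfA)).map
        (fun c => (c, keys.filter (fun k => gidOfA k == c))))
      Prod.fst
      (fun p => (PySem.List.sorted p.2 (fun x => x) false).foldl
        (fun s k => s ++ ((PySem.Dict.mk data).getD k "" ++ " ")) "")
      (PySem.Dict.empty : PySem.Dict String String) (fun a _ => rfl) (by
        simp [List.map_map, Function.comp_def,
          PySem.Set.nodup_ofList (keys.map gidOfA)])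
  refine hmain.trans ?_
  have hempty : (PySem.Dict.empty : PySem.Dict String String).items = [] := rfl
  simp [hempty, List.map_map, Function.comp_def, pvLookup]

-- string-fold helper: toList of a string concatenation fold
theorem foldlStr_toList (l : List String) (s : String) :
    (l.foldl (· ++ ·) s).toList = s.toList ++ (l.map String.toList).flatten := by
  induction l generalizing s with
  | nil => simp
  | cons a t ih => simp [ih]

-- "".join with the empty separator is flatten
theorem joinE_chars (ps : List (List Char)) : PySem.Chars.join [] ps = ps.flatten := by
  induction ps with
  | nil => rfl
  | cons p t ih =>
    cases t with
    | nil => simp [PySem.Chars.join, List.intercalate]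
    | cons q u => simp_all [PySem.Chars.join_cons_cons]

theorem joinEmpty (l : List String) : PySem.Str.join "" l = l.foldl (· ++ ·) "" := by
  apply String.toList_injective
  rw [foldlStr_toList]
  simp [PySem.Str.join, joinE_chars]

-- B's loop: insert F g at the first occurrence of each granule id g
theorem items_setIfAbsent (F : String → String) (keys : List String)
    (d : PySem.Dict String String) (hnd : d.keys.Nodup)
    (hit : d.items = d.keys.map (fun c => (c, F c))) :
    (keys.foldl (fun d k =>
        let g := gidOfB k
        if d.contains g then d else d.insert g (F g)) d).items
      = (PySem.Set.update d.keys (keys.map gidOfB)).map (fun c => (c, F c)) := by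
  induction keys generalizing d with
  | nil => simpa [PySem.Set.update_nil] using hit
  | cons k t ih =>
    simp only [List.foldl_cons, List.map_cons, PySem.Set.update_cons]
    cases h : d.contains (gidOfB k) with
    | true =>
      have hmem : gidOfB k ∈ d.keys := (PySem.Dict.contains_iff_mem_keys _ _).mp h
      rw [PySem.Set.add_of_mem hmem]
      simpa [h] using ih d hnd hit
    | false =>
      have hnmem : gidOfB k ∉ d.keys := fun hm =>
        by simp [(PySem.Dict.contains_iff_mem_keys _ _).mpr hm] at h
      rw [PySem.Set.add_of_not_mem hnmem]
      have hk' : (d.insert (gidOfB k) (F (gidOfB k))).keys = d.keys ++ [gidOfB k] :=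
        PySem.Dict.keys_insert_of_not_contains _ _ h
      have hnd' : (d.insert (gidOfB k) (F (gidOfB k))).keys.Nodup := by
        rw [hk']
        exact hnd.append (List.nodup_singleton _) (by simpa using hnmem)
      have hit' : (d.insert (gidOfB k) (F (gidOfB k))).items =
          (d.insert (gidOfB k) (F (gidOfB k))).keys.map (fun c => (c, F c)) := by
        rw [PySem.Dict.items_insert_of_not_contains _ _ h, hk', hit]
        simp
      simpa [h, hk'] using ih _ hnd' hit'

-- B's result, characterised in the same shape
theorem mergeGranule_alt_items (data : List (String × String)) :
    mergeGranule_alt data =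
      (PySem.Set.ofList ((data.map Prod.fst).map gidOfB)).map
        (fun c => (c, PySem.Str.join ""
          (((PySem.List.sorted (data.map Prod.fst) (fun x => x) false).filter
              (fun k => gidOfB k == c)).map
            (fun k => pvLookup data k ++ " ")))) := by
  unfold mergeGranule_alt
  rw [items_setIfAbsent
      (fun g => PySem.Str.join ""
        (((PySem.List.sorted (data.map Prod.fst) (fun x => x) false).filter
            (fun k => gidOfB k == g)).map
          (fun k => (PySem.Dict.mk data).getD k "" ++ " ")))
      (data.map Prod.fst) PySem.Dict.empty (by simp) (by rfl)]
  simp [PySem.Set.update_nil_left, pvLookup]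

-- ===== VERDICT (by name: the statement is the Claim_ definition above) =====
theorem mergeGranule_spec : Claim_equal_mergeGranule := by
  intro data _
  show mergeGranule data = mergeGranule_alt data
  rw [mergeGranule_items, mergeGranule_alt_items, gidOfB_eq]
  refine List.map_congr_left (fun c _ => ?_)
  refine Prod.ext rfl ?_
  show _ = PySem.Str.join "" _
  rw [joinEmpty, filter_sorted_eq_sorted_filter, List.foldl_map]
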